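-- pv_equiv track=rewrite | github.com/ctc316/algorithm-python | Lintcode/G_Practice/Tag_Matrix/1628. Driving problem.py | drivingProblem
-- ===== SOURCE A (Python) =====
-- class UnionFind:
--     def __init__(self, n):
--         self.n = n
--         self.parent = [i for i in range(n + 2)]
--
--     def find(self, a):
--         path = []
--         while self.parent[a] != a:
--             path.append(a)
--             a = self.parent[a]
--
--         for p in path:
--             self.parent[p] = a
--
--         return a
--
--     def union(self, a, b):
--         root_a = self.find(a)
--         root_b = self.find(b)
--         if root_a != root_b:
--             self.parent[root_b] = root_a
--
-- def drivingProblem(L, W, p):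
--     '''
--     0 1 0 0 0 0 0 0 0 0
--     1 1 1 0 0 0 0 0 0 0
--     0 1 0 0 0 0 0 0 0 0
--     0 0 0 0 0 0 0 0 0 0
--     0 0 0 0 0 0 0 0 0 0
--     0 0 0 0 0 0 1 0 0 0
--     0 0 0 0 0 1 1 1 0 0
--     0 0 0 0 0 0 1 0 0 0
--     0 0 0 0 0 0 0 0 0 0
--     是否可以从路的一侧通过不断连接路障到达路的另一侧, 并且每个连接的距离都小于车的直径+路障的直径 (在连接路沿和路障时, 距离limit为车的直径和路障的半径
--     '''
--     n = len(p)
--     union = UnionFind(n)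
--     for i in range(n):
--         for j in range(i + 1, n):
--             dx = abs(p[i][0] - p[j][0])
--             dy = abs(p[i][1] - p[j][1])
--             if dx + dy <= 6:
--                 union.union(i, j)
--
--         # edge
--         if p[i][1] <= 5:
--             union.union(i, n)
--         if W - p[i][1] <= 5:
--             union.union(i, n + 1)
--
--     return "no" if union.find(n) == union.find(n + 1) else "yes"
-- ===== SOURCE B (Python) =====
-- def drivingProblem(L, W, p):
--     n = len(p)
--     label = list(range(n + 2))
--
--     def merge(a, b):
--         nonlocal label
--         la, lb = label[a], label[b]
--         if la != lb:
--             label = [la if v == lb else v for v in label]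
--
--     for i in range(n):
--         for j in range(i + 1, n):
--             if abs(p[i][0] - p[j][0]) + abs(p[i][1] - p[j][1]) <= 6:
--                 merge(i, j)
--         if p[i][1] <= 5:
--             merge(i, n)
--         if W - p[i][1] <= 5:
--             merge(i, n + 1)
--     return "no" if label[n] == label[n + 1] else "yes"
-- ===== Notes on version B (the rewrite author's own statement) =====
-- stated objective: simpler
-- what changed: replaces the union-find structure (parent forest, path-compressing find, root comparison) with a flat component-label array that is wholesale relabelled on each merge and compared directly at the end
import Mathlib
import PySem

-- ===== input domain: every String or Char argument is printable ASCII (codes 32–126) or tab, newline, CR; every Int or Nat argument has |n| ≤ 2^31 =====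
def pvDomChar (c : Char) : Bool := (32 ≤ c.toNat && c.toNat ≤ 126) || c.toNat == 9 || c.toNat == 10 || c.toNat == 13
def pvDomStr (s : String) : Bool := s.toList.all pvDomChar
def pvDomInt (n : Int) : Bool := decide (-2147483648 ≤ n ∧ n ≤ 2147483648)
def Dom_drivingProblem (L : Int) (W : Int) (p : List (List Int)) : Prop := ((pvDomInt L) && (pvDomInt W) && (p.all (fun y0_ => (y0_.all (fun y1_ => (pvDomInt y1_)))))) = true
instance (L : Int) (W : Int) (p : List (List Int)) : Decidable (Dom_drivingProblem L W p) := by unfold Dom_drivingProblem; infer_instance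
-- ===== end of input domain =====

-- B replaces A's union-find (parent forest, path-compressing find) with a flat component-label
-- array relabelled wholesale on each merge: simpler, no speed claim. Neither version mutates its
-- arguments; the equivalence is about the return value.

-- ===== PORT A =====
-- UnionFind.find: follow parents collecting the path, then compress the path to the root.
-- The Python 'while' loop is ported with fuel = |parent|; under the forest invariant the chain
-- reaches its root in fewer steps, so the port is exact on every input the claim covers.
def ufFindPath (parent : List Nat) : Nat → Nat → List Nat × Nat
  | 0, a => ([], a)
  | fuel+1, a =>
    if parent.getD a a ≠ a then
      let r := ufFindPath parent fuel (parent.getD a a)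
      (a :: r.1, r.2)
    else ([], a)

def ufFind (parent : List Nat) (a : Nat) : List Nat × Nat :=
  let pr := ufFindPath parent parent.length a
  (pr.1.foldl (fun P q => P.set q pr.2) parent, pr.2)

def ufUnion (parent : List Nat) (a b : Nat) : List Nat :=
  let fa := ufFind parent a
  let fb := ufFind fa.1 b
  if fa.2 ≠ fb.2 then fb.1.set fb.2 fa.2 else fb.1

-- row accesses p[i][0] / p[i][1]; the getD defaults are unreachable under Pre_drivingProblem
def drivingProblem (L : Int) (W : Int) (p : List (List Int)) : String :=
  let n := p.length
  let Pf := (List.range n).foldl (fun P i =>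
    let P1 := (List.range' (i+1) (n - (i+1))).foldl (fun P j =>
      let dx := ((p.getD i []).getD 0 0 - (p.getD j []).getD 0 0).natAbs
      let dy := ((p.getD i []).getD 1 0 - (p.getD j []).getD 1 0).natAbs
      if dx + dy ≤ 6 then ufUnion P i j else P) P
    let P2 := if (p.getD i []).getD 1 0 ≤ 5 then ufUnion P1 i n else P1
    if W - (p.getD i []).getD 1 0 ≤ 5 then ufUnion P2 i (n+1) else P2) (List.range (n + 2))
  let f1 := ufFind Pf n
  let f2 := ufFind f1.1 (n+1)
  if f1.2 == f2.2 then "no" else "yes"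

-- ===== PORT B =====
-- merge: if the labels differ, relabel every vertex carrying label[b] to label[a]
def ccMerge (lab : List Nat) (a b : Nat) : List Nat :=
  let la := lab.getD a 0
  let lb := lab.getD b 0
  if la ≠ lb then lab.map (fun v => if v = lb then la else v) else lab

def drivingProblem_alt (L : Int) (W : Int) (p : List (List Int)) : String :=
  let n := p.length
  let lf := (List.range n).foldl (fun lab i =>
    let l1 := (List.range' (i+1) (n - (i+1))).foldl (fun lab j =>
      if (((p.getD i []).getD 0 0 - (p.getD j []).getD 0 0).natAbs
          + ((p.getD i []).getD 1 0 - (p.getD j []).getD 1 0).natAbs) ≤ 6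
      then ccMerge lab i j else lab) lab
    let l2 := if (p.getD i []).getD 1 0 ≤ 5 then ccMerge l1 i n else l1
    if W - (p.getD i []).getD 1 0 ≤ 5 then ccMerge l2 i (n+1) else l2) (List.range (n + 2))
  if lf.getD n 0 == lf.getD (n+1) 0 then "no" else "yes"

-- ===== PRECONDITION & SPEC =====
-- Pre_ excludes exactly the inputs where Python A raises IndexError: a row of p with fewer than
-- two entries (both programs read p[i][0] and p[i][1]); B raises there too.
def Pre_drivingProblem (L : Int) (W : Int) (p : List (List Int)) : Prop :=
  ∀ r ∈ p, 2 ≤ r.length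
instance (L : Int) (W : Int) (p : List (List Int)) : Decidable (Pre_drivingProblem L W p) := by unfold Pre_drivingProblem; infer_instance

def pvWitness_drivingProblem : Int × Int × List (List Int) := (10, 10, [[1, 3], [4, 4]])

def Spec_drivingProblem (L : Int) (W : Int) (p : List (List Int)) (out : String) : Prop := out = drivingProblem_alt L W p
instance (L : Int) (W : Int) (p : List (List Int)) (out : String) : Decidable (Spec_drivingProblem L W p out) := by unfold Spec_drivingProblem; infer_instance

-- ===== CLAIM (what is proved, stated in full; the proofs are below) =====
def Claim_equal_drivingProblem : Prop := ∀ (L : Int) (W : Int) (p : List (List Int)), Dom_drivingProblem L W p → Pre_drivingProblem L W p → Spec_drivingProblem L W p (drivingProblem L W p)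

-- ===== LEMMAS AND PROOFS =====

-- one parent-pointer step; out-of-range indices are fixpoints (getD default)
def pstep (P : List Nat) (x : Nat) : Nat := P.getD x x

-- x reaches the fixpoint r by iterating pstep
def ReachFix (P : List Nat) (x r : Nat) : Prop :=
  (∃ k, (pstep P)^[k] x = r) ∧ pstep P r = r

def GoodP (P : List Nat) : Prop := ∀ x, ∃ r, ReachFix P x r
def ClosedP (P : List Nat) : Prop := ∀ x, x < P.length → P.getD x x < P.length

-- the full invariant tying A's parent array to B's label array
def INVP (N : Nat) (P lab : List Nat) : Prop :=
  P.length = N ∧ lab.length = N ∧ GoodP P ∧ ClosedP P ∧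
  ∀ x y, x < N → y < N → ∀ r s, ReachFix P x r → ReachFix P y s →
    (r = s ↔ lab.getD x 0 = lab.getD y 0)

theorem pstep_set (P : List Nat) (q r j : Nat) :
    pstep (P.set q r) j = if q = j ∧ q < P.length then r else pstep P j := by
  unfold pstep
  simp only [List.getD_eq_getElem?_getD, List.getElem?_set]
  split_ifs with h1 h2 h3 <;> simp_all <;> omega

theorem pstep_ge (P : List Nat) (x : Nat) (h : P.length ≤ x) : pstep P x = x :=
  List.getD_eq_default P x h

theorem iter_fix (P : List Nat) (r k : Nat) (h : pstep P r = r) : (pstep P)^[k] r = r :=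
  Function.iterate_fixed h k

theorem iter_past_fix (P : List Nat) (x r : Nat) (k m : Nat) (h : k ≤ m)
    (hk : (pstep P)^[k] x = r) (hr : pstep P r = r) : (pstep P)^[m] x = r := by
  have h1 : (pstep P)^[(m - k) + k] x = (pstep P)^[m - k] ((pstep P)^[k] x) :=
    Function.iterate_add_apply _ _ _ _
  rw [Nat.sub_add_cancel h] at h1
  rw [h1, hk]
  exact iter_fix P r (m - k) hr

theorem reach_unique (P : List Nat) (x r s : Nat)
    (h1 : ReachFix P x r) (h2 : ReachFix P x s) : r = s := by
  obtain ⟨⟨k, hk⟩, hr⟩ := h1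
  obtain ⟨⟨m, hm⟩, hs⟩ := h2
  rcases Nat.le_total k m with h | h
  · rw [← iter_past_fix P x r k m h hk hr, hm]
  · rw [← iter_past_fix P x s m k h hm hs, hk]

theorem reach_of_fix (P : List Nat) (r : Nat) (h : pstep P r = r) : ReachFix P r r :=
  ⟨⟨0, rfl⟩, h⟩

theorem reach_step (P : List Nat) (x r : Nat) (h : ReachFix P (pstep P x) r) : ReachFix P x r := by
  obtain ⟨⟨k, hk⟩, hr⟩ := h
  exact ⟨⟨k + 1, by rw [Function.iterate_succ_apply]; exact hk⟩, hr⟩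

theorem reach_trans (P : List Nat) (x y r : Nat) (h1 : ∃ k, (pstep P)^[k] x = y)
    (h2 : ReachFix P y r) : ReachFix P x r := by
  obtain ⟨k, hk⟩ := h1
  obtain ⟨⟨m, hm⟩, hr⟩ := h2
  exact ⟨⟨m + k, by rw [Function.iterate_add_apply, hk]; exact hm⟩, hr⟩

theorem iter_lt (P : List Nat) (hC : ClosedP P) (x : Nat) (hx : x < P.length) (k : Nat) :
    (pstep P)^[k] x < P.length := by
  induction k generalizing x with
  | zero => exact hx
  | succ k ih => rw [Function.iterate_succ_apply]; exact ih _ (hC x hx)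

theorem reach_lt (P : List Nat) (hC : ClosedP P) (x r : Nat) (hx : x < P.length)
    (h : ReachFix P x r) : r < P.length := by
  obtain ⟨⟨k, hk⟩, _⟩ := h
  rw [← hk]; exact iter_lt P hC x hx k

theorem nonfix_lt (P : List Nat) (x : Nat) (h : pstep P x ≠ x) : x < P.length := by
  by_contra hc
  exact h (pstep_ge P x (Nat.le_of_not_lt hc))

-- the chain from x reaches its root within |P| steps, through non-fix nodes only
theorem reach_bound (P : List Nat) (x r : Nat) (h : ReachFix P x r) :
    ∃ k, k ≤ P.length ∧ (pstep P)^[k] x = r ∧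
      ∀ i < k, pstep P ((pstep P)^[i] x) ≠ (pstep P)^[i] x := by
  obtain ⟨⟨k, hk⟩, hr⟩ := h
  have hQ : pstep P ((pstep P)^[k] x) = (pstep P)^[k] x := by rw [hk]; exact hr
  have hex : ∃ m, pstep P ((pstep P)^[m] x) = (pstep P)^[m] x := ⟨k, hQ⟩
  classical
  set k0 := Nat.find hex with hk0
  have hfix0 : pstep P ((pstep P)^[k0] x) = (pstep P)^[k0] x := Nat.find_spec hex
  have hmin : ∀ i < k0, pstep P ((pstep P)^[i] x) ≠ (pstep P)^[i] x :=
    fun i hi => Nat.find_min hex hi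
  have hle : k0 ≤ k := Nat.find_min' hex hQ
  have hval : (pstep P)^[k0] x = r := by
    have := iter_past_fix P x ((pstep P)^[k0] x) k0 k hle rfl hfix0
    rw [hk] at this; omega
  -- the k0 nodes before the root are pairwise distinct and all in range
  have haux : ∀ i j, i < j → j < k0 → (pstep P)^[i] x ≠ (pstep P)^[j] x := by
    intro i j hij hj hne
    have h1 : (pstep P)^[i + (k0 - j)] x = (pstep P)^[k0] x := by
      have e1 : (pstep P)^[(k0 - j) + i] x = (pstep P)^[k0 - j] ((pstep P)^[i] x) :=
        Function.iterate_add_apply _ _ _ _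
      have e2 : (pstep P)^[(k0 - j) + j] x = (pstep P)^[k0 - j] ((pstep P)^[j] x) :=
        Function.iterate_add_apply _ _ _ _
      rw [hne] at e1
      rw [← e2] at e1
      have : (k0 - j) + j = k0 := by omega
      rw [this] at e1
      have : i + (k0 - j) = (k0 - j) + i := by omega
      rw [this, e1]
    exact hmin (i + (k0 - j)) (by omega) (by rw [h1]; exact hfix0)
  have hinj : Set.InjOn (fun i => (pstep P)^[i] x) (Finset.range k0) := by
    intro i hi j hj hij
    simp only [Finset.coe_range, Set.mem_Iio] at hi hj
    by_contra hne
    rcases lt_or_gt_of_ne hne with h | h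
    · exact haux i j h hj hij
    · exact haux j i h hi hij.symm
  have hmem : ∀ i ∈ Finset.range k0, (pstep P)^[i] x ∈ Finset.range P.length := by
    intro i hi
    rw [Finset.mem_range] at hi ⊢
    exact nonfix_lt P _ (hmin i hi)
  have hcard := Finset.card_le_card_of_injOn _ hmem hinj
  simp only [Finset.card_range] at hcard
  exact ⟨k0, hcard, hval, hmin⟩

-- findPath returns the explicit chain and the root
theorem findPath_spec (P : List Nat) (r : Nat) (hr : pstep P r = r) :
    ∀ k x fuel, k ≤ fuel → (pstep P)^[k] x = r →
      (∀ i < k, pstep P ((pstep P)^[i] x) ≠ (pstep P)^[i] x) →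
      ufFindPath P fuel x = ((List.range k).map (fun i => (pstep P)^[i] x), r) := by
  intro k
  induction k with
  | zero =>
    intro x fuel _ hchain _
    simp only [Function.iterate_zero, id_eq] at hchain
    subst hchain
    cases fuel with
    | zero => simp [ufFindPath]
    | succ fuel => simp [ufFindPath, pstep] at hr ⊢; exact hr
  | succ k ih =>
    intro x fuel hle hchain hnf
    obtain ⟨fuel, rfl⟩ : ∃ f', fuel = f' + 1 := ⟨fuel - 1, by omega⟩
    have h0 : pstep P x ≠ x := by
      have := hnf 0 (by omega)
      simpa using this
    have hrec := ih (pstep P x) fuel (by omega)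
      (by rw [← Function.iterate_succ_apply]; exact hchain)
      (by intro i hi
          have := hnf (i + 1) (by omega)
          rwa [Function.iterate_succ_apply] at this)
    show (if P.getD x x ≠ x then _ else _) = _
    rw [if_pos (by exact h0)]
    have : (P.getD x x) = pstep P x := rfl
    simp only [this, hrec]
    -- x :: map over range k of the shifted chain = map over range (k+1)
    have hlist : x :: List.map (fun i => (pstep P)^[i] (pstep P x)) (List.range k)
        = List.map (fun i => (pstep P)^[i] x) (List.range (k+1)) := by
      simp only [List.range_succ_eq_map, List.map_cons, List.map_map, Function.iterate_zero, id_eq]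
      congr 1
    rw [hlist]

-- setting q to point at its own root changes no reachability facts
theorem pstep_set_self (P : List Nat) (q r : Nat) (hql : q < P.length) :
    pstep (P.set q r) q = r := by
  rw [pstep_set]; exact if_pos ⟨rfl, hql⟩

theorem pstep_set_ne (P : List Nat) (q r x : Nat) (hx : q ≠ x) :
    pstep (P.set q r) x = pstep P x := by
  rw [pstep_set, if_neg]; intro h; exact hx h.1

theorem set_same_fwd (P : List Nat) (q r : Nat) (hq : ReachFix P q r) :
    ∀ k x s, (pstep P)^[k] x = s → pstep P s = s → ReachFix (P.set q r) x s := by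
  by_cases hql : q < P.length
  case neg =>
    rw [List.set_eq_of_length_le (by omega)]
    intro k x s hc hs; exact ⟨⟨k, hc⟩, hs⟩
  intro k
  induction k with
  | zero =>
    intro x s hc hs
    simp only [Function.iterate_zero, id_eq] at hc; subst hc
    by_cases hxq : x = q
    · subst hxq
      have hrx : r = x := reach_unique P x r x hq (reach_of_fix P x hs)
      rw [hrx]
      exact reach_of_fix _ _ (pstep_set_self P x x hql)
    · exact reach_of_fix _ _ (by rw [pstep_set_ne P q r x (fun h => hxq h.symm)]; exact hs)
  | succ k ih =>
    intro x s hc hs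
    by_cases hxq : x = q
    · subst hxq
      have hsr : s = r := reach_unique P x s r ⟨⟨k+1, hc⟩, hs⟩ hq
      rw [hsr]
      apply reach_step
      rw [pstep_set_self P x r hql]
      by_cases hrq : r = x
      · rw [hrq]
        exact reach_of_fix _ _ (pstep_set_self P x x hql)
      · exact reach_of_fix _ _ (by rw [pstep_set_ne P x r r (fun h => hrq h.symm)]; exact hq.2)
    · apply reach_step
      rw [pstep_set_ne P q r x (fun h => hxq h.symm)]
      exact ih (pstep P x) s (by rwa [← Function.iterate_succ_apply]) hs

theorem set_same_bwd (P : List Nat) (q r : Nat) (hq : ReachFix P q r) :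
    ∀ k x s, (pstep (P.set q r))^[k] x = s → pstep (P.set q r) s = s → ReachFix P x s := by
  by_cases hql : q < P.length
  case neg =>
    rw [List.set_eq_of_length_le (by omega)]
    intro k x s hc hs; exact ⟨⟨k, hc⟩, hs⟩
  intro k
  induction k with
  | zero =>
    intro x s hc hs
    simp only [Function.iterate_zero, id_eq] at hc; subst hc
    by_cases hxq : x = q
    · subst hxq
      rw [pstep_set_self P x r hql] at hs
      subst hs; exact hq
    · rw [pstep_set_ne P q r x (fun h => hxq h.symm)] at hs
      exact reach_of_fix P x hs
  | succ k ih =>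
    intro x s hc hs
    by_cases hxq : x = q
    · subst hxq
      rw [Function.iterate_succ_apply, pstep_set_self P x r hql] at hc
      have hrs : ReachFix P r s := ih r s hc hs
      exact reach_trans P x r s hq.1 hrs
    · rw [Function.iterate_succ_apply, pstep_set_ne P q r x (fun h => hxq h.symm)] at hc
      exact reach_step P x s (ih (pstep P x) s hc hs)

theorem set_same_iff (P : List Nat) (q r : Nat) (hq : ReachFix P q r) (x s : Nat) :
    ReachFix (P.set q r) x s ↔ ReachFix P x s := by
  constructor
  · rintro ⟨⟨k, hk⟩, hs⟩; exact set_same_bwd P q r hq k x s hk hs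
  · rintro ⟨⟨k, hk⟩, hs⟩; exact set_same_fwd P q r hq k x s hk hs

theorem closed_set (P : List Nat) (q r : Nat) (hC : ClosedP P)
    (hr : q < P.length → r < P.length) : ClosedP (P.set q r) := by
  intro x hx
  rw [List.length_set] at hx ⊢
  have := pstep_set P q r x
  unfold pstep at this
  rw [this]
  split_ifs with h
  · exact hr h.2
  · exact hC x hx

-- after P.set rb ra (both roots, distinct), every root rb becomes ra, others unchanged
theorem set_merge_reach (P : List Nat) (ra rb : Nat) (hra : pstep P ra = ra)
    (hrb : pstep P rb = rb) (hne : ra ≠ rb) (hrbl : rb < P.length) (x s : Nat)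
    (h : ReachFix P x s) : ReachFix (P.set rb ra) x (if s = rb then ra else s) := by
  have hfix_ra' : pstep (P.set rb ra) ra = ra := by
    rw [pstep_set_ne P rb ra ra (fun h => hne h.symm)]; exact hra
  have hreach_rb : ReachFix (P.set rb ra) rb ra := by
    apply reach_step
    rw [pstep_set_self P rb ra hrbl]
    exact reach_of_fix _ _ hfix_ra'
  obtain ⟨⟨k, hk⟩, hs⟩ := h
  induction k generalizing x with
  | zero =>
    simp only [Function.iterate_zero, id_eq] at hk; subst hk
    by_cases hxb : x = rb
    · subst hxb; rw [if_pos rfl]; exact hreach_rb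
    · rw [if_neg hxb]
      exact reach_of_fix _ _ (by rw [pstep_set_ne P rb ra x (fun h => hxb h.symm)]; exact hs)
  | succ k ih =>
    by_cases hxb : x = rb
    · subst hxb
      have : s = x := by rw [← hk]; exact iter_fix P x (k+1) hrb
      subst this
      rw [if_pos rfl]; exact hreach_rb
    · apply reach_step
      rw [pstep_set_ne P rb ra x (fun h => hxb h.symm)]
      exact ih (pstep P x) (by rwa [← Function.iterate_succ_apply])

theorem compress_spec (r : Nat) :
    ∀ (path : List Nat) (Pc : List Nat), (∀ q ∈ path, ReachFix Pc q r) → ClosedP Pc →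
      (∀ x s, ReachFix (path.foldl (fun P q => P.set q r) Pc) x s ↔ ReachFix Pc x s) ∧
      (path.foldl (fun P q => P.set q r) Pc).length = Pc.length ∧
      ClosedP (path.foldl (fun P q => P.set q r) Pc) := by
  intro path
  induction path with
  | nil => intro Pc _ hC; exact ⟨fun _ _ => Iff.rfl, rfl, hC⟩
  | cons q t ih =>
    intro Pc hq hC
    simp only [List.foldl_cons]
    have hq0 : ReachFix Pc q r := hq q List.mem_cons_self
    have hiff0 := set_same_iff Pc q r hq0
    have hC0 : ClosedP (Pc.set q r) :=
      closed_set Pc q r hC (fun hql => reach_lt Pc hC q r hql hq0)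
    have ht : ∀ q' ∈ t, ReachFix (Pc.set q r) q' r :=
      fun q' hq' => (hiff0 q' r).mpr (hq q' (List.mem_cons_of_mem q hq'))
    obtain ⟨hiff1, hlen1, hC1⟩ := ih (Pc.set q r) ht hC0
    refine ⟨fun x s => (hiff1 x s).trans (hiff0 x s), ?_, hC1⟩
    rw [hlen1, List.length_set]

theorem ufFind_spec (P : List Nat) (a : Nat) (hG : GoodP P) (hC : ClosedP P) :
    ReachFix P a (ufFind P a).2 ∧
    (∀ x s, ReachFix (ufFind P a).1 x s ↔ ReachFix P x s) ∧
    (ufFind P a).1.length = P.length ∧ ClosedP (ufFind P a).1 := by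
  obtain ⟨r, hr⟩ := hG a
  obtain ⟨k, hkle, hkr, hnf⟩ := reach_bound P a r hr
  have hfp := findPath_spec P r hr.2 k a P.length hkle hkr hnf
  have hpath : ∀ q ∈ (List.range k).map (fun i => (pstep P)^[i] a), ReachFix P q r := by
    intro q hqmem
    simp only [List.mem_map, List.mem_range] at hqmem
    obtain ⟨i, hik, rfl⟩ := hqmem
    refine ⟨⟨k - i, ?_⟩, hr.2⟩
    rw [← Function.iterate_add_apply]
    have : k - i + i = k := by omega
    rw [this, hkr]
  obtain ⟨hiff, hlen, hC'⟩ := compress_spec r _ P hpath hC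
  have heq2 : (ufFind P a).2 = r := by unfold ufFind; rw [hfp]
  have heq1 : (ufFind P a).1 =
      ((List.range k).map (fun i => (pstep P)^[i] a)).foldl (fun P q => P.set q r) P := by
    unfold ufFind; rw [hfp]
  rw [heq1, heq2]
  exact ⟨hr, hiff, hlen, hC'⟩

theorem good_of_iff (P P' : List Nat) (hG : GoodP P)
    (hiff : ∀ x s, ReachFix P' x s ↔ ReachFix P x s) : GoodP P' := by
  intro x; obtain ⟨r, hr⟩ := hG x; exact ⟨r, (hiff x r).mpr hr⟩

theorem getD_map_lt (l : List Nat) (f : Nat → Nat) (x : Nat) (h : x < l.length) :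
    (l.map f).getD x 0 = f (l.getD x 0) := by
  simp [List.getD_eq_getElem?_getD, List.getElem?_map, List.getElem?_eq_getElem h]

-- the main step: one union on A's side matches one merge on B's side
theorem step_INVP (N : Nat) (P lab : List Nat) (h : INVP N P lab) (a b : Nat)
    (ha : a < N) (hb : b < N) : INVP N (ufUnion P a b) (ccMerge lab a b) := by
  obtain ⟨hPl, hll, hG, hC, hRel⟩ := h
  obtain ⟨hreach1, hiff1, hlen1, hC1⟩ := ufFind_spec P a hG hC
  have hG1 : GoodP (ufFind P a).1 := good_of_iff _ _ hG hiff1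
  obtain ⟨hreach2, hiff2, hlen2, hC2⟩ := ufFind_spec (ufFind P a).1 b hG1 hC1
  set P1 := (ufFind P a).1 with hP1
  set ra := (ufFind P a).2 with hra
  set P2 := (ufFind P1 b).1 with hP2
  set rb := (ufFind P1 b).2 with hrb
  have hG2 : GoodP P2 := good_of_iff _ _ hG1 hiff2
  have hiff12 : ∀ x s, ReachFix P2 x s ↔ ReachFix P x s :=
    fun x s => (hiff2 x s).trans (hiff1 x s)
  have hlen12 : P2.length = N := by rw [hlen2, hlen1, hPl]
  have hreachb : ReachFix P b rb := (hiff1 _ _).mp hreach2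
  have hRel2 : ∀ x y, x < N → y < N → ∀ r s, ReachFix P2 x r → ReachFix P2 y s →
      (r = s ↔ lab.getD x 0 = lab.getD y 0) :=
    fun x y hx hy r s hrx hsy =>
      hRel x y hx hy r s ((hiff12 _ _).mp hrx) ((hiff12 _ _).mp hsy)
  have hreacha2 : ReachFix P2 a ra := (hiff12 _ _).mpr hreach1
  have hreachb2 : ReachFix P2 b rb := (hiff2 _ _).mpr hreach2
  have hkey : ra = rb ↔ lab.getD a 0 = lab.getD b 0 :=
    hRel a b ha hb ra rb hreach1 hreachb
  have hU : ufUnion P a b = if ra ≠ rb then P2.set rb ra else P2 := rfl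
  have hM : ccMerge lab a b =
      if lab.getD a 0 ≠ lab.getD b 0 then
        lab.map (fun v => if v = lab.getD b 0 then lab.getD a 0 else v)
      else lab := rfl
  by_cases hcase : ra = rb
  · -- roots equal, labels equal: both sides are no-ops
    rw [hU, hM, if_neg (by simpa using hcase), if_neg (by simpa using hkey.mp hcase)]
    exact ⟨hlen12, hll, hG2, hC2, fun x y hx hy r s hrx hsy =>
      hRel2 x y hx hy r s hrx hsy⟩
  · have hlab : lab.getD a 0 ≠ lab.getD b 0 := fun hl => hcase (hkey.mpr hl)
    rw [hU, hM, if_pos hcase, if_pos hlab]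
    have hfixra : pstep P2 ra = ra := hreacha2.2
    have hfixrb : pstep P2 rb = rb := hreachb2.2
    have hrbl : rb < P2.length := reach_lt P2 hC2 b rb (by omega) hreachb2
    have hral : ra < P2.length := reach_lt P2 hC2 a ra (by omega) hreacha2
    have hmerge := set_merge_reach P2 ra rb hfixra hfixrb hcase hrbl
    refine ⟨?_, ?_, ?_, ?_, ?_⟩
    · rw [List.length_set]; exact hlen12
    · rw [List.length_map]; exact hll
    · intro x
      obtain ⟨rx, hrx⟩ := hG2 x
      exact ⟨_, hmerge x rx hrx⟩
    · exact closed_set P2 rb ra hC2 (fun _ => hral)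
    · intro x y hx hy r s hr hs
      obtain ⟨rx, hrx⟩ := hG2 x
      obtain ⟨ry, hry⟩ := hG2 y
      have hrval : r = if rx = rb then ra else rx :=
        reach_unique _ x r _ hr (hmerge x rx hrx)
      have hsval : s = if ry = rb then ra else ry :=
        reach_unique _ y s _ hs (hmerge y ry hry)
      have e1 : rx = ry ↔ lab.getD x 0 = lab.getD y 0 := hRel2 x y hx hy rx ry hrx hry
      have e2 : rx = rb ↔ lab.getD x 0 = lab.getD b 0 := hRel2 x b hx hb rx rb hrx hreachb2
      have e3 : rx = ra ↔ lab.getD x 0 = lab.getD a 0 := hRel2 x a hx ha rx ra hrx hreacha2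
      have e4 : ry = rb ↔ lab.getD y 0 = lab.getD b 0 := hRel2 y b hy hb ry rb hry hreachb2
      have e5 : ry = ra ↔ lab.getD y 0 = lab.getD a 0 := hRel2 y a hy ha ry ra hry hreacha2
      have hgx : (lab.map (fun v => if v = lab.getD b 0 then lab.getD a 0 else v)).getD x 0
          = if lab.getD x 0 = lab.getD b 0 then lab.getD a 0 else lab.getD x 0 :=
        getD_map_lt lab _ x (by omega)
      have hgy : (lab.map (fun v => if v = lab.getD b 0 then lab.getD a 0 else v)).getD y 0
          = if lab.getD y 0 = lab.getD b 0 then lab.getD a 0 else lab.getD y 0 :=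
        getD_map_lt lab _ y (by omega)
      rw [hrval, hsval, hgx, hgy]
      by_cases h1 : rx = rb <;> by_cases h2 : ry = rb
      · rw [if_pos h1, if_pos h2, if_pos (e2.mp h1), if_pos (e4.mp h2)]
        simp
      · rw [if_pos h1, if_neg h2, if_pos (e2.mp h1), if_neg (fun hl => h2 (e4.mpr hl))]
        rw [eq_comm, e5, eq_comm]
      · rw [if_neg h1, if_pos h2, if_neg (fun hl => h1 (e2.mpr hl)), if_pos (e4.mp h2)]
        rw [e3]
      · rw [if_neg h1, if_neg h2, if_neg (fun hl => h1 (e2.mpr hl)),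
          if_neg (fun hl => h2 (e4.mpr hl))]
        exact e1

-- parallel fold: a relation preserved by the two step functions is preserved by the folds
theorem foldl_rel {α β γ : Type} (R : α → β → Prop) (f : α → γ → α) (g : β → γ → β) :
    ∀ (l : List γ) (x : α) (y : β), R x y →
      (∀ c x' y', c ∈ l → R x' y' → R (f x' c) (g y' c)) →
      R (l.foldl f x) (l.foldl g y) := by
  intro l
  induction l with
  | nil => intro x y h _; exact h
  | cons c t ih =>
    intro x y h hstep
    exact ih _ _ (hstep c x y (List.mem_cons_self) h)
      (fun c' x' y' hc' => hstep c' x' y' (List.mem_cons_of_mem c hc'))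

theorem getD_range (N x d : Nat) (h : x < N) : (List.range N).getD x d = x := by
  simp [List.getD_eq_getElem?_getD, List.getElem?_range h]

theorem init_fix (N x : Nat) : pstep (List.range N) x = x := by
  by_cases h : x < N
  · exact getD_range N x x h
  · exact pstep_ge _ x (by rw [List.length_range]; omega)

theorem init_INVP (N : Nat) : INVP N (List.range N) (List.range N) := by
  refine ⟨List.length_range, List.length_range, ?_, ?_, ?_⟩
  · exact fun x => ⟨x, reach_of_fix _ x (init_fix N x)⟩
  · intro x hx
    show pstep (List.range N) x < _
    rw [init_fix N x]; exact hx
  · intro x y hx hy r s hr hs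
    have hrx : r = x := reach_unique _ x r x hr (reach_of_fix _ x (init_fix N x))
    have hsy : s = y := reach_unique _ y s y hs (reach_of_fix _ y (init_fix N y))
    rw [hrx, hsy, getD_range N x 0 hx, getD_range N y 0 hy]

-- the two fold bodies of the ports, named so the parallel-fold lemma can be applied
def innerA (p : List (List Int)) (n i : Nat) (P : List Nat) : List Nat :=
  (List.range' (i+1) (n - (i+1))).foldl (fun P j =>
    let dx := ((p.getD i []).getD 0 0 - (p.getD j []).getD 0 0).natAbs
    let dy := ((p.getD i []).getD 1 0 - (p.getD j []).getD 1 0).natAbs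
    if dx + dy ≤ 6 then ufUnion P i j else P) P

def stepA (p : List (List Int)) (W : Int) (n : Nat) (P : List Nat) (i : Nat) : List Nat :=
  if W - (p.getD i []).getD 1 0 ≤ 5 then
    ufUnion (if (p.getD i []).getD 1 0 ≤ 5 then ufUnion (innerA p n i P) i n
             else innerA p n i P) i (n+1)
  else (if (p.getD i []).getD 1 0 ≤ 5 then ufUnion (innerA p n i P) i n else innerA p n i P)

def innerB (p : List (List Int)) (n i : Nat) (lab : List Nat) : List Nat :=
  (List.range' (i+1) (n - (i+1))).foldl (fun lab j =>
    if (((p.getD i []).getD 0 0 - (p.getD j []).getD 0 0).natAbs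
        + ((p.getD i []).getD 1 0 - (p.getD j []).getD 1 0).natAbs) ≤ 6
    then ccMerge lab i j else lab) lab

def stepB (p : List (List Int)) (W : Int) (n : Nat) (lab : List Nat) (i : Nat) : List Nat :=
  if W - (p.getD i []).getD 1 0 ≤ 5 then
    ccMerge (if (p.getD i []).getD 1 0 ≤ 5 then ccMerge (innerB p n i lab) i n
             else innerB p n i lab) i (n+1)
  else (if (p.getD i []).getD 1 0 ≤ 5 then ccMerge (innerB p n i lab) i n else innerB p n i lab)

theorem step_full (p : List (List Int)) (W : Int) (i : Nat) (P lab : List Nat)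
    (hi : i ∈ List.range p.length) (h : INVP (p.length + 2) P lab) :
    INVP (p.length + 2) (stepA p W p.length P i) (stepB p W p.length lab i) := by
  rw [List.mem_range] at hi
  have hinner : INVP (p.length + 2) (innerA p p.length i P) (innerB p p.length i lab) := by
    unfold innerA innerB
    apply foldl_rel _ _ _ _ _ _ h
    intro j P' lab' hj hINV'
    rw [List.mem_range'_1] at hj
    show INVP _ (if _ ≤ 6 then ufUnion P' i j else P') (if _ ≤ 6 then ccMerge lab' i j else lab')
    split_ifs with hc
    · exact step_INVP _ P' lab' hINV' i j (by omega) (by omega)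
    · exact hINV'
  unfold stepA stepB
  split_ifs with hc2 hc1 hc1
  · exact step_INVP _ _ _
      (step_INVP _ _ _ hinner i p.length (by omega) (by omega)) i (p.length+1)
      (by omega) (by omega)
  · exact step_INVP _ _ _ hinner i (p.length+1) (by omega) (by omega)
  · exact step_INVP _ _ _ hinner i p.length (by omega) (by omega)
  · exact hinner

theorem main_eq (L W : Int) (p : List (List Int)) :
    drivingProblem L W p = drivingProblem_alt L W p := by
  have hINV := foldl_rel (INVP (p.length + 2)) (stepA p W p.length) (stepB p W p.length)
    (List.range p.length) (List.range (p.length + 2)) (List.range (p.length + 2))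
    (init_INVP _) (fun i P lab hi h => step_full p W i P lab hi h)
  set Pf := (List.range p.length).foldl (stepA p W p.length) (List.range (p.length + 2)) with hPf
  set lf := (List.range p.length).foldl (stepB p W p.length) (List.range (p.length + 2)) with hlf
  obtain ⟨hPl, hll, hG, hC, hRel⟩ := hINV
  obtain ⟨hr1, hiff1, hlen1, hC1⟩ := ufFind_spec Pf p.length hG hC
  have hG1 := good_of_iff _ _ hG hiff1
  obtain ⟨hr2, _, _, _⟩ := ufFind_spec (ufFind Pf p.length).1 (p.length + 1) hG1 hC1
  have hr2' : ReachFix Pf (p.length + 1) (ufFind (ufFind Pf p.length).1 (p.length + 1)).2 :=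
    (hiff1 _ _).mp hr2
  have hkey := hRel p.length (p.length + 1) (by omega) (by omega) _ _ hr1 hr2'
  show (if (ufFind Pf p.length).2 == (ufFind (ufFind Pf p.length).1 (p.length + 1)).2
        then "no" else "yes")
     = (if lf.getD p.length 0 == lf.getD (p.length + 1) 0 then "no" else "yes")
  by_cases h : (ufFind Pf p.length).2 = (ufFind (ufFind Pf p.length).1 (p.length + 1)).2
  · rw [if_pos (by simpa using h), if_pos (by simpa using hkey.mp h)]
  · rw [if_neg (by simpa using h), if_neg (by simpa using fun hl => h (hkey.mpr hl))]

-- ===== VERDICT (by name: the statement is the Claim_ definition above) =====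
theorem drivingProblem_spec : Claim_equal_drivingProblem := by
  intro L W p _ _
  exact main_eq L W p
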